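-- pv_equiv track=rewrite | github.com/itdove/devaiflow | devflow/verification/test_runner.py | parse_test_summary
-- ===== SOURCE A (Python) =====
-- def parse_test_summary(output: str) -> str:
--     """Extract test summary from output.
--
--     Args:
--         output: Full test output
--
--     Returns:
--         Summary line (e.g., "12 passed in 2.3s")
--     """
--     # pytest format
--     pytest_match = [
--         line for line in output.split("\n")
--         if " passed" in line or " failed" in line
--     ]
--     if pytest_match:
--         return pytest_match[-1].strip()
--
--     # npm test / jest format
--     jest_match = [
--         line for line in output.split("\n")
--         if "Tests:" in line or "Test Suites:" in line
--     ]
--     if jest_match: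
--         return " | ".join(jest_match).strip()
--
--     # Go test format
--     go_match = [
--         line for line in output.split("\n")
--         if line.startswith("PASS") or line.startswith("FAIL")
--     ]
--     if go_match:
--         return go_match[-1].strip()
--
--     # cargo test format
--     cargo_match = [
--         line for line in output.split("\n")
--         if "test result:" in line
--     ]
--     if cargo_match:
--         return cargo_match[-1].strip()
--
--     # Default: return last non-empty line
--     lines = [line.strip() for line in output.split("\n") if line.strip()]
--     if lines:
--         return lines[-1]
--
--     return "No summary available"
-- ===== SOURCE B (Python) =====
-- def parse_test_summary(output: str) -> str:
--     """Single pass: bucket each line by category, then return by priority."""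
--     pytest_b, jest_b, go_b, cargo_b, nonempty = [], [], [], [], []
--     for line in output.split("\n"):
--         if " passed" in line or " failed" in line:
--             pytest_b.append(line)
--         if "Tests:" in line or "Test Suites:" in line:
--             jest_b.append(line)
--         if line.startswith("PASS") or line.startswith("FAIL"):
--             go_b.append(line)
--         if "test result:" in line:
--             cargo_b.append(line)
--         s = line.strip()
--         if s:
--             nonempty.append(s)
--     if pytest_b:
--         return pytest_b[-1].strip()
--     if jest_b:
--         return " | ".join(jest_b).strip()
--     if go_b:
--         return go_b[-1].strip()
--     if cargo_b:
--         return cargo_b[-1].strip()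
--     if nonempty:
--         return nonempty[-1]
--     return "No summary available"
-- ===== Notes on version B (the rewrite author's own statement) =====
-- stated objective: alternative
-- what changed: Replaces five separate full scans of the split output (one list comprehension per test-framework format) with a single pass that buckets each line into all matching categories, followed by one priority lookup over the buckets.
import Mathlib
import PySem

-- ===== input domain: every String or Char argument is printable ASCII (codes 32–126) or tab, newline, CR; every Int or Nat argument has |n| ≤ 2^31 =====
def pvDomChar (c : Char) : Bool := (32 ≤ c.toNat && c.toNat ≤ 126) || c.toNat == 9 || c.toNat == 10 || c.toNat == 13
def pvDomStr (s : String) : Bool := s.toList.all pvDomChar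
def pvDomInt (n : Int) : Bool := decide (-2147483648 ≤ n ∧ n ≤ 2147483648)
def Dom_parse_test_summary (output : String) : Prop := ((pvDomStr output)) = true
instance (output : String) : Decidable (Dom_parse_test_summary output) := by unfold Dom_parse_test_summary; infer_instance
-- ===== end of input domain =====

-- B replaces A's five separate scans of the line list with one bucketing pass plus a priority lookup (alternative decomposition, same result).

-- ===== PORT A =====
-- output.split("\n"): split? is total for a nonempty separator
def pvLines (output : String) : List String := (PySem.Str.split? output "\n").getD []

-- line predicates, matching A's comprehension conditions
def pvIsPytest (l : String) : Bool := PySem.Str.isIn " passed" l || PySem.Str.isIn " failed" l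
def pvIsJest (l : String) : Bool := PySem.Str.isIn "Tests:" l || PySem.Str.isIn "Test Suites:" l
def pvIsGo (l : String) : Bool := PySem.Str.startswith l "PASS" || PySem.Str.startswith l "FAIL"
def pvIsCargo (l : String) : Bool := PySem.Str.isIn "test result:" l

def parse_test_summary (output : String) : String :=
  let pytest_match := (pvLines output).filter pvIsPytest
  if !pytest_match.isEmpty then
    PySem.Str.strip ((PySem.List.pyGet? pytest_match (-1)).getD "")
  else
    let jest_match := (pvLines output).filter pvIsJest
    if !jest_match.isEmpty then
      PySem.Str.strip (PySem.Str.join " | " jest_match)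
    else
      let go_match := (pvLines output).filter pvIsGo
      if !go_match.isEmpty then
        PySem.Str.strip ((PySem.List.pyGet? go_match (-1)).getD "")
      else
        let cargo_match := (pvLines output).filter pvIsCargo
        if !cargo_match.isEmpty then
          PySem.Str.strip ((PySem.List.pyGet? cargo_match (-1)).getD "")
        else
          let lines := ((pvLines output).map PySem.Str.strip).filter (fun s => s != "")
          if !lines.isEmpty then (PySem.List.pyGet? lines (-1)).getD ""
          else "No summary available"

-- ===== PORT B =====
-- the single bucketing step of Source B's loop: fill every matching bucket independently
def pvBucketStep (st : List String × List String × List String × List String × List String)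
    (line : String) : List String × List String × List String × List String × List String :=
  let (p, j, g, c, ne) := st
  let p := if pvIsPytest line then p ++ [line] else p
  let j := if pvIsJest line then j ++ [line] else j
  let g := if pvIsGo line then g ++ [line] else g
  let c := if pvIsCargo line then c ++ [line] else c
  let s := PySem.Str.strip line
  let ne := if s != "" then ne ++ [s] else ne
  (p, j, g, c, ne)

def parse_test_summary_alt (output : String) : String :=
  match (pvLines output).foldl pvBucketStep ([], [], [], [], []) with
  | (p, j, g, c, ne) =>
  if !p.isEmpty then PySem.Str.strip ((PySem.List.pyGet? p (-1)).getD "")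
  else if !j.isEmpty then PySem.Str.strip (PySem.Str.join " | " j)
  else if !g.isEmpty then PySem.Str.strip ((PySem.List.pyGet? g (-1)).getD "")
  else if !c.isEmpty then PySem.Str.strip ((PySem.List.pyGet? c (-1)).getD "")
  else if !ne.isEmpty then (PySem.List.pyGet? ne (-1)).getD ""
  else "No summary available"

-- ===== PRECONDITION & SPEC =====
def Spec_parse_test_summary (output : String) (out : String) : Prop := out = parse_test_summary_alt output
instance (output : String) (out : String) : Decidable (Spec_parse_test_summary output out) := by unfold Spec_parse_test_summary; infer_instance

-- ===== CLAIM (what is proved, stated in full; the proofs are below) =====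
def Claim_equal_parse_test_summary : Prop := ∀ (output : String), Dom_parse_test_summary output → Spec_parse_test_summary output (parse_test_summary output)

-- ===== LEMMAS AND PROOFS =====

-- the bucketing fold computes exactly A's five filtered lists, appended to the accumulators
theorem pvBucketStep_foldl (ls : List String)
    (p j g c ne : List String) :
    ls.foldl pvBucketStep (p, j, g, c, ne) =
      (p ++ ls.filter pvIsPytest, j ++ ls.filter pvIsJest, g ++ ls.filter pvIsGo,
       c ++ ls.filter pvIsCargo,
       ne ++ (ls.map PySem.Str.strip).filter (fun s => s != "")) := by
  induction ls generalizing p j g c ne with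
  | nil => simp
  | cons a t ih =>
    simp only [List.foldl_cons, pvBucketStep, List.filter_cons, List.map_cons]
    rw [ih]
    split_ifs <;> simp_all

theorem parse_test_summary_spec : Claim_equal_parse_test_summary := by
  intro output _
  unfold Spec_parse_test_summary parse_test_summary parse_test_summary_alt
  rw [pvBucketStep_foldl]
  simp
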